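-- pv_equiv track=rewrite | github.com/weshouman/test-report-viewer | test_report_viewer/core/service.py | _build_breadcrumbs_for_test
-- ===== SOURCE A (Python) =====
-- from typing import List, Optional, Dict, Any
--
-- def _build_breadcrumbs_for_test(test_name: str) -> List[tuple]:
--     """Build breadcrumbs for test path."""
--     parts = ("/" + test_name.replace(".", "/")).strip("/").split("/")
--     breadcrumbs = []
--     acc = ""
--     for part in parts:
--         acc = acc + "/" + part
--         breadcrumbs.append((part, acc.strip("/")))
--     return breadcrumbs
-- ===== SOURCE B (Python) =====
-- def _build_breadcrumbs_for_test(test_name: str):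
--     """Build breadcrumbs for test path."""
--     parts = ("/" + test_name.replace(".", "/")).strip("/").split("/")
--     return [(part, "/".join(parts[:i + 1]).strip("/")) for i, part in enumerate(parts)]
-- ===== Notes on version B (the rewrite author's own statement) =====
-- stated objective: simpler
-- what changed: Replaces the stateful loop threading a running 'acc' string with a stateless comprehension that computes each breadcrumb prefix directly as the stripped '/'-join of the prefix slice parts[:i+1].
import Mathlib
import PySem

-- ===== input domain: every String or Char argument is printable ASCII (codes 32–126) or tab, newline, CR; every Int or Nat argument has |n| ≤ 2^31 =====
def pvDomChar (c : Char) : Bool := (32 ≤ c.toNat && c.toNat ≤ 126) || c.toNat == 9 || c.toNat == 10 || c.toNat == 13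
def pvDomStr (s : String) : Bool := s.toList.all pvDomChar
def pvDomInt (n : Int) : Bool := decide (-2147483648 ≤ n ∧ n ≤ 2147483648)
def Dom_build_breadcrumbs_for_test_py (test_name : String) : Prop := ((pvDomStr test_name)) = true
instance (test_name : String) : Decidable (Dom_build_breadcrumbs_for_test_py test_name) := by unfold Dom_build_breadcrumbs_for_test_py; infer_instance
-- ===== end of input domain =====

-- B replaces A's stateful loop (running `acc` string) with a stateless map that
-- computes each breadcrumb prefix directly as the stripped '/'-join of the prefix slice.


-- ===== PORT A =====
-- parts = ("/" + test_name.replace(".", "/")).strip("/").split("/"), shared by both ports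
def pvParts (test_name : String) : List (List Char) :=
  PySem.Chars.splitOn
    (PySem.Chars.stripChars ('/' :: PySem.Chars.replace test_name.toList ['.'] ['/']) ['/'])
    ['/']

def build_breadcrumbs_for_test_py (test_name : String) : List (String × String) :=
  let parts := pvParts test_name
  (parts.foldl
    (fun (st : List Char × List (String × String)) part =>
      let acc := st.1 ++ '/' :: part
      (acc, st.2 ++ [(String.ofList part, String.ofList (PySem.Chars.stripChars acc ['/']))]))
    ([], [])).2

-- ===== PORT B =====
def build_breadcrumbs_for_test_py_alt (test_name : String) : List (String × String) :=
  let parts := pvParts test_name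
  (PySem.List.enumerate parts).map (fun ip =>
    (String.ofList ip.2,
     String.ofList (PySem.Chars.stripChars (PySem.Chars.join ['/'] (parts.take (ip.1.toNat + 1))) ['/'])))

-- ===== PRECONDITION & SPEC =====
def Spec_build_breadcrumbs_for_test_py (test_name : String) (out : List (String × String)) : Prop := out = build_breadcrumbs_for_test_py_alt test_name
instance (test_name : String) (out : List (String × String)) : Decidable (Spec_build_breadcrumbs_for_test_py test_name out) := by unfold Spec_build_breadcrumbs_for_test_py; infer_instance

-- ===== CLAIM (what is proved, stated in full; the proofs are below) =====
def Claim_equal_build_breadcrumbs_for_test_py : Prop := ∀ (test_name : String), Dom_build_breadcrumbs_for_test_py test_name → Spec_build_breadcrumbs_for_test_py test_name (build_breadcrumbs_for_test_py test_name)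

-- ===== LEMMAS AND PROOFS =====

-- the breadcrumb entries A's fold emits, starting from accumulator `acc`
def pvProds (acc : List Char) : List (List Char) → List (String × String)
  | [] => []
  | p :: ps =>
      (String.ofList p, String.ofList (PySem.Chars.stripChars (acc ++ '/' :: p) ['/'])) ::
        pvProds (acc ++ '/' :: p) ps

lemma pvFoldA_out (rest : List (List Char)) : ∀ (acc : List Char) (out : List (String × String)),
    (rest.foldl
      (fun (st : List Char × List (String × String)) part =>
        let acc := st.1 ++ '/' :: part
        (acc, st.2 ++ [(String.ofList part, String.ofList (PySem.Chars.stripChars acc ['/']))]))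
      (acc, out)).2 = out ++ pvProds acc rest := by
  induction rest with
  | nil => intro acc out; simp [pvProds]
  | cons p ps ih => intro acc out; simp [pvProds, ih]

-- A's accumulator after the parts `pre` equals '/' followed by the '/'-join of `pre` (empty for pre = [])
def pvFlat (pre : List (List Char)) : List Char :=
  pre.foldl (fun a p => a ++ '/' :: p) []

lemma pvFlat_cons (x : List Char) (xs : List (List Char)) :
    pvFlat (x :: xs) = '/' :: PySem.Chars.join ['/'] (x :: xs) := by
  induction xs generalizing x with
  | nil => simp [pvFlat, PySem.Chars.join_singleton]
  | cons y ys ih =>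
      have h : pvFlat (x :: y :: ys) = ('/' :: x) ++ pvFlat (y :: ys) := by
        simp [pvFlat]
      rw [h, ih y, PySem.Chars.join_cons_cons]
      simp

lemma pvStrip_slash_cons (cs : List Char) :
    PySem.Chars.stripChars ('/' :: cs) ['/'] = PySem.Chars.stripChars cs ['/'] := by
  simp [PySem.Chars.stripChars, List.dropWhile]

lemma pvStrip_flat (xs : List (List Char)) :
    PySem.Chars.stripChars (pvFlat xs) ['/'] =
      PySem.Chars.stripChars (PySem.Chars.join ['/'] xs) ['/'] := by
  cases xs with
  | nil => simp [pvFlat]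
  | cons x xs => rw [pvFlat_cons, pvStrip_slash_cons]

lemma pvMain (rest : List (List Char)) : ∀ (pre : List (List Char)),
    pvProds (pvFlat pre) rest =
      (PySem.List.enumerate rest (pre.length : Int)).map (fun ip =>
        (String.ofList ip.2,
         String.ofList (PySem.Chars.stripChars
           (PySem.Chars.join ['/'] ((pre ++ rest).take (ip.1.toNat + 1))) ['/']))) := by
  induction rest with
  | nil => intro pre; simp [pvProds, PySem.List.enumerate]
  | cons p ps ih =>
      intro pre
      have hflat : pvFlat pre ++ '/' :: p = pvFlat (pre ++ [p]) := by
        simp [pvFlat]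
      have htake : (pre ++ p :: ps).take (pre.length + 1) = pre ++ [p] := by
        rw [show pre ++ p :: ps = (pre ++ [p]) ++ ps by simp]
        rw [List.take_append_of_le_length (by simp)]
        simp
      simp only [pvProds, PySem.List.enumerate, List.map_cons]
      rw [hflat, ih (pre ++ [p])]
      congr 1
      · rw [pvStrip_flat, Int.toNat_natCast, htake]
      · simp

-- ===== VERDICT (by name: the statement is the Claim_ definition above) =====
theorem build_breadcrumbs_for_test_py_spec : Claim_equal_build_breadcrumbs_for_test_py := by
  intro test_name _
  unfold Spec_build_breadcrumbs_for_test_py build_breadcrumbs_for_test_py build_breadcrumbs_for_test_py_alt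
  rw [pvFoldA_out]
  have := pvMain (pvParts test_name) []
  simp [pvFlat] at this
  simpa using this
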